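-- pv_equiv track=rewrite | github.com/corymb/cracking-the-coding-interview | src/c1/q4.py | is_palindrome_permutation_2
-- ===== SOURCE A (Python) =====
-- def is_palindrome_permutation_2(xs):
--     """
--     This isn't necessarily more performant because although it avoids the
--     second loop, it's still O(n) on account of not being able to avoid
--     looking through the whole string.
--
--     TODO: Profile this and previous solution. This might even be slower
--     because the optimiser won't be able to unroll the loops.
--     """
--     frequency = {}
--     count_odd = 0
--     for x in xs:
--         c = _get_char_code(x)
--         if not c == -1:
--             if c in frequency:
--                 frequency[c] += 1
--             else:
--                 frequency[c] = 1
--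
--             if frequency[c] % 2 == 1:
--                 count_odd += 1
--             else:
--                 count_odd -= 1
--     return count_odd <= 1
--
-- def _get_char_code(c):
--     """
--     Takes character, converts to ascii code and returns integer if input falls
--     between A-Z or a-z.
--
--     This is basically Java's Character.getNumericValue() (which is case
--     insensitive)
--
--     A or a = 0
--     Z or z = 25
--     """
--     code = ord(c)
--     if 65 <= code <= 90:
--         return code - ord('A')
--     if 97 <= code <= 122:
--         return code - ord('a')
--     return -1
-- ===== SOURCE B (Python) =====
-- def is_palindrome_permutation_2(xs):
--     codes = [c for c in map(_get_char_code, xs) if c != -1]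
--     return sum(codes.count(k) % 2 for k in range(26)) <= 1
--
-- def _get_char_code(c):
--     code = ord(c)
--     if 65 <= code <= 90:
--         return code - ord('A')
--     if 97 <= code <= 122:
--         return code - ord('a')
--     return -1
-- ===== Notes on version B (the rewrite author's own statement) =====
-- stated objective: alternative
-- what changed: B replaces A's single pass with an incrementally maintained frequency dict and count_odd counter by two staged passes: first build the filtered code list, then for each of the 26 letter codes count its occurrences and check that at most one count is odd.
import Mathlib
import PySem

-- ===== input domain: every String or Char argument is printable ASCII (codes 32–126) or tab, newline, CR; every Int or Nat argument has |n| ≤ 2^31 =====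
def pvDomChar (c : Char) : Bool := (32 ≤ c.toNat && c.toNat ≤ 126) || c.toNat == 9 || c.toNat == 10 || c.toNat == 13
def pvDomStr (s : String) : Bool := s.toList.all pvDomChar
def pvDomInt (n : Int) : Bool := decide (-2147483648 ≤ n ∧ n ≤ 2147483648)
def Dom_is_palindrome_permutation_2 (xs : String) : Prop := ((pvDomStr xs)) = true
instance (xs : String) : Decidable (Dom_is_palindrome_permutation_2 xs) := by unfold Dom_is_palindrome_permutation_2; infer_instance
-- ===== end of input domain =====

-- B replaces A's single pass (frequency dict + incrementally adjusted count_odd) by two staged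
-- passes: build the filtered code list, then count each of the 26 letter codes; objective: alternative.

-- ===== PORT A =====
-- _get_char_code, shared helper of both Pythons
def pvGetCharCode (c : Char) : Int :=
  let code : Int := (c.toNat : Int)
  if 65 ≤ code ∧ code ≤ 90 then code - 65
  else if 97 ≤ code ∧ code ≤ 122 then code - 97
  else -1

-- loop body of A: the key c is present in the dict at the `frequency[c]` lookup, so
-- `getD c 0` is exactly Python's `frequency[c]` there (never the default)
def pvStepA (st : PySem.Dict Int Int × Int) (x : Char) : PySem.Dict Int Int × Int :=
  let c := pvGetCharCode x
  if ¬ c = -1 then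
    let freq := if st.1.contains c then st.1.modify c 0 (· + 1) else st.1.insert c 1
    let cnt := if PySem.Int.mod (freq.getD c 0) 2 = 1 then st.2 + 1 else st.2 - 1
    (freq, cnt)
  else st

def is_palindrome_permutation_2 (xs : String) : Bool :=
  let st := xs.toList.foldl pvStepA (PySem.Dict.empty, 0)
  decide (st.2 ≤ 1)

-- ===== PORT B =====
-- codes = [c for c in map(_get_char_code, xs) if c != -1]
def pvCodes (xs : String) : List Int :=
  (xs.toList.map pvGetCharCode).filter (fun c => !(c == -1))

-- sum(codes.count(k) % 2 for k in range(26)) <= 1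
def is_palindrome_permutation_2_alt (xs : String) : Bool :=
  let codes := pvCodes xs
  decide ((PySem.List.pyRange 0 26 1).foldl
    (fun acc k => acc + PySem.Int.mod (PySem.List.count codes k) 2) 0 ≤ 1)

-- ===== PRECONDITION & SPEC =====
def Spec_is_palindrome_permutation_2 (xs : String) (out : Bool) : Prop := out = is_palindrome_permutation_2_alt xs
instance (xs : String) (out : Bool) : Decidable (Spec_is_palindrome_permutation_2 xs out) := by unfold Spec_is_palindrome_permutation_2; infer_instance

-- ===== CLAIM (what is proved, stated in full; the proofs are below) =====
def Claim_equal_is_palindrome_permutation_2 : Prop := ∀ (xs : String), Dom_is_palindrome_permutation_2 xs → Spec_is_palindrome_permutation_2 xs (is_palindrome_permutation_2 xs)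

-- ===== LEMMAS AND PROOFS =====

-- sum of the parities of the dict's values over the 26 letter codes
def pvS (d : PySem.Dict Int Int) : Int :=
  ∑ k ∈ Finset.range 26, PySem.Int.mod (d.getD (k : Int) 0) 2

lemma pv_code_range (x : Char) (h : ¬ pvGetCharCode x = -1) :
    0 ≤ pvGetCharCode x ∧ pvGetCharCode x < 26 := by
  simp only [pvGetCharCode] at h ⊢
  split_ifs at h ⊢ <;> omega

-- the dict value at each key after A's loop is the base value plus the filtered-code count
lemma pv_counts (l : List Char) (d : PySem.Dict Int Int) (co : Int) (k : Int) :
    ((l.foldl pvStepA (d, co)).1).getD k 0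
      = d.getD k 0 + (((l.map pvGetCharCode).filter (fun c => !(c == -1))).count k : Int) := by
  induction l generalizing d co with
  | nil => simp
  | cons x l ih =>
    simp only [List.foldl_cons, List.map_cons]
    by_cases hc : pvGetCharCode x = -1
    · rw [show pvStepA (d, co) x = (d, co) by simp [pvStepA, hc]]
      rw [ih d co]
      simp [hc]
    · generalize hg : pvGetCharCode x = c at hc
      have hA1 : (pvStepA (d, co) x).1
          = if d.contains c then d.modify c 0 (· + 1) else d.insert c 1 := by
        simp [pvStepA, hg, hc]
      have hfil : ((c :: l.map pvGetCharCode).filter (fun c => !(c == -1)))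
          = c :: (l.map pvGetCharCode).filter (fun c => !(c == -1)) := by
        simp [hc]
      rw [show pvStepA (d, co) x = ((pvStepA (d, co) x).1, (pvStepA (d, co) x).2) from rfl,
          ih, hA1, hfil, List.count_cons]
      by_cases hkc : k = c
      · subst hkc
        by_cases h : d.contains k
        · rw [if_pos h, PySem.Dict.getD_modify_self]
          simp only [BEq.rfl, if_pos]
          push_cast
          ring
        · rw [if_neg (by simp [h]), PySem.Dict.getD_insert_self,
              PySem.Dict.getD_of_not_contains d 0 (by simpa using h)]
          simp only [BEq.rfl, if_pos]
          push_cast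
          ring
      · have hif : (if (c == k) = true then 1 else 0) = 0 := by
          simp only [beq_iff_eq, ite_eq_right_iff]
          intro h; exact absurd h.symm hkc
        by_cases h : d.contains c
        · rw [if_pos h, PySem.Dict.getD_modify_of_ne d 0 _ hkc, hif]
          push_cast
          ring
        · rw [if_neg (by simp [h]), PySem.Dict.getD_insert_of_ne d 1 0 hkc, hif]
          push_cast
          ring

-- the loop invariant: count_odd equals the sum of the parities of the 26 letter counts
lemma pv_loop (l : List Char) (d : PySem.Dict Int Int) (co : Int)
    (h0 : ∀ k : Int, 0 ≤ d.getD k 0) (hco : co = pvS d) :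
    (l.foldl pvStepA (d, co)).2 = pvS (l.foldl pvStepA (d, co)).1 := by
  induction l generalizing d co with
  | nil => simpa using hco
  | cons x l ih =>
    simp only [List.foldl_cons]
    by_cases hc : pvGetCharCode x = -1
    · rw [show pvStepA (d, co) x = (d, co) by simp [pvStepA, hc]]
      exact ih d co h0 hco
    · obtain ⟨hc0, hc26⟩ := pv_code_range x hc
      generalize hg : pvGetCharCode x = c at hc hc0 hc26
      set d' := if d.contains c then d.modify c 0 (· + 1) else d.insert c 1 with hd'
      have hval : d'.getD c 0 = d.getD c 0 + 1 := by
        rw [hd']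
        by_cases h : d.contains c
        · simp [h, PySem.Dict.getD_modify_self]
        · simp only [h, Bool.false_eq_true, if_false]
          rw [PySem.Dict.getD_insert_self,
              PySem.Dict.getD_of_not_contains d 0 (by simpa using h)]
          omega
      have hne : ∀ c' : Int, c' ≠ c → d'.getD c' 0 = d.getD c' 0 := by
        intro c' hcc
        rw [hd']
        by_cases h : d.contains c
        · simp [h, PySem.Dict.getD_modify_of_ne d 0 _ hcc]
        · simp [h, PySem.Dict.getD_insert_of_ne d 1 0 hcc]
      have h0' : ∀ k : Int, 0 ≤ d'.getD k 0 := by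
        intro k
        by_cases hkc : k = c
        · subst hkc; rw [hval]; have := h0 k; omega
        · rw [hne k hkc]; exact h0 k
      have hA : pvStepA (d, co) x
          = (d', if PySem.Int.mod (d'.getD c 0) 2 = 1 then co + 1 else co - 1) := by
        rw [hd']; simp [pvStepA, hg, hc]
      rw [hA]
      refine ih d' _ h0' ?_
      -- the sum differs from pvS d only in the term at c
      have hcmem : c.toNat ∈ Finset.range 26 := by
        simp [Finset.mem_range]; omega
      have hcast : ((c.toNat : Int)) = c := Int.toNat_of_nonneg hc0
      have hsum : pvS d' = pvS d - PySem.Int.mod (d.getD c 0) 2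
          + PySem.Int.mod (d'.getD c 0) 2 := by
        unfold pvS
        rw [← Finset.sum_erase_add _ _ hcmem, ← Finset.sum_erase_add _ _ hcmem]
        have hrest : ∑ k ∈ (Finset.range 26).erase c.toNat,
            PySem.Int.mod (d'.getD (k : Int) 0) 2
            = ∑ k ∈ (Finset.range 26).erase c.toNat,
            PySem.Int.mod (d.getD (k : Int) 0) 2 := by
          refine Finset.sum_congr rfl ?_
          intro k hk
          have hkne : (k : Int) ≠ c := by
            have := Finset.ne_of_mem_erase hk
            omega
          rw [hne _ hkne]
        rw [hrest, hcast]
        ring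
      have hv0 : 0 ≤ d.getD c 0 := h0 c
      have hmodold : PySem.Int.mod (d.getD c 0) 2 = (d.getD c 0) % 2 :=
        PySem.Int.mod_eq_emod_of_pos (by omega)
      have hmodnew : PySem.Int.mod (d'.getD c 0) 2 = (d.getD c 0 + 1) % 2 := by
        rw [hval]; exact PySem.Int.mod_eq_emod_of_pos (by omega)
      by_cases hodd : PySem.Int.mod (d'.getD c 0) 2 = 1
      · rw [if_pos hodd, hsum, hco, hodd]
        rw [hmodnew] at hodd
        rw [hmodold]
        omega
      · rw [if_neg hodd, hsum, hco]
        rw [hmodnew] at hodd ⊢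
        rw [hmodold]
        omega

-- bridge: the list-of-range sum equals the Finset.range sum
lemma pv_sum_range (n : Nat) (f : Nat → Int) :
    ((List.range n).map f).sum = ∑ k ∈ Finset.range n, f k := by
  induction n with
  | zero => simp
  | succ n ih => rw [List.range_succ, Finset.sum_range_succ, List.map_append]; simp [ih]

-- ===== VERDICT (by name: the statement is the Claim_ definition above) =====
theorem is_palindrome_permutation_2_spec : Claim_equal_is_palindrome_permutation_2 := by
  intro xs _
  unfold Spec_is_palindrome_permutation_2 is_palindrome_permutation_2 is_palindrome_permutation_2_alt
  simp only []
  have hloop := pv_loop xs.toList PySem.Dict.empty 0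
    (by intro k; simp [PySem.Dict.getD_empty])
    (by unfold pvS; simp [PySem.Dict.getD_empty, PySem.Int.mod])
  have hcount : ∀ k : Int,
      ((xs.toList.foldl pvStepA (PySem.Dict.empty, 0)).1).getD k 0
        = (pvCodes xs).count k := by
    intro k
    rw [pv_counts xs.toList PySem.Dict.empty 0 k]
    simp [pvCodes, PySem.Dict.getD_empty]
  have hB : (PySem.List.pyRange 0 26 1).foldl
      (fun acc k => acc + PySem.Int.mod (PySem.List.count (pvCodes xs) k) 2) 0
      = pvS (xs.toList.foldl pvStepA (PySem.Dict.empty, 0)).1 := by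
    rw [PySem.List.foldl_add, PySem.List.pyRange_one]
    simp only [List.map_map, Function.comp_def, zero_add]
    rw [show ((26 : Int) - 0).toNat = 26 from rfl]
    rw [pv_sum_range 26 (fun k => PySem.Int.mod ((PySem.List.count (pvCodes xs) (k : Int)) : Int) 2)]
    unfold pvS
    refine Finset.sum_congr rfl ?_
    intro k hk
    rw [PySem.List.count_eq, ← hcount (k : Int)]
  rw [hloop, hB]
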